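-- pv_equiv track=rewrite | github.com/csixteen/HackerRank | Algorithms/anagram.py | changes
-- ===== SOURCE A (Python) =====
-- from collections import Counter
--
-- def changes(s1, s2):
--     c1, c2 = Counter(s1), Counter(s2)
--     n = 0
--     for c in c2:
--         current = c2[c] - c1.get(c, 0)
--         if current > 0:
--             n += current
--     return n
-- ===== SOURCE B (Python) =====
-- def changes(s1, s2):
--     a = sorted(s1)
--     b = sorted(s2)
--     i = j = matched = 0
--     while i < len(a) and j < len(b):
--         if a[i] == b[j]:
--             matched += 1
--             i += 1
--             j += 1
--         elif a[i] < b[j]: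
--             i += 1
--         else:
--             j += 1
--     return len(s2) - matched
-- ===== Notes on version B (the rewrite author's own statement) =====
-- stated objective: alternative
-- what changed: B drops the Counters entirely: it sorts both strings and runs a two-pointer merge that counts the matched multiset overlap, returning len(s2) minus the matches; A accumulates per-character positive surpluses of Counter(s2) over Counter(s1).
import Mathlib
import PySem

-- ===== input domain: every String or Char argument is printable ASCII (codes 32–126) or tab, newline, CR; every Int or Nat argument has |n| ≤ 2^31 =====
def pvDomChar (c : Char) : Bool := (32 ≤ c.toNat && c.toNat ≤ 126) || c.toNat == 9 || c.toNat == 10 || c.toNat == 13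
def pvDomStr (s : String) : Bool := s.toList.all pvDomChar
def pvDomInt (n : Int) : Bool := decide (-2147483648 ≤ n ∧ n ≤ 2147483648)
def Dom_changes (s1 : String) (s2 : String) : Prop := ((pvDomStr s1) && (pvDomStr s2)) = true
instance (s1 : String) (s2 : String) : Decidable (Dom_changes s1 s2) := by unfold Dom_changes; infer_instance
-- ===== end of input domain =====

-- B replaces A's Counter-surplus accumulation by sorting both strings and counting the
-- matched multiset overlap with a two-pointer merge; alternative algorithm, same result.

-- ===== PORT A =====
def changes (s1 : String) (s2 : String) : Int :=
  let c1 := PySem.Dict.counter s1.toList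
  let c2 := PySem.Dict.counter s2.toList
  c2.keys.foldl (fun n c =>
    let current := c2.getD c 0 - c1.getD c 0
    if current > 0 then n + current else n) 0

-- ===== PORT B =====
-- the while loop of Source B: indices i, j into the sorted lists, accumulator matched
def pvMatchLoop (a b : List Char) (i j matched : Nat) : Nat :=
  if h : i < a.length ∧ j < b.length then
    if a[i] = b[j] then pvMatchLoop a b (i+1) (j+1) (matched+1)
    else if a[i] < b[j] then pvMatchLoop a b (i+1) j matched
    else pvMatchLoop a b i (j+1) matched
  else matched
termination_by (a.length - i) + (b.length - j)
decreasing_by all_goals omega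

def changes_alt (s1 : String) (s2 : String) : Int :=
  let a := PySem.List.sorted s1.toList (fun x => x) false
  let b := PySem.List.sorted s2.toList (fun x => x) false
  (PySem.Str.len s2 : Int) - (pvMatchLoop a b 0 0 0 : Int)

-- ===== PRECONDITION & SPEC =====
def Spec_changes (s1 : String) (s2 : String) (out : Int) : Prop := out = changes_alt s1 s2
instance (s1 : String) (s2 : String) (out : Int) : Decidable (Spec_changes s1 s2 out) := by unfold Spec_changes; infer_instance

-- ===== CLAIM (what is proved, stated in full; the proofs are below) =====
def Claim_equal_changes : Prop := ∀ (s1 : String) (s2 : String), Dom_changes s1 s2 → Spec_changes s1 s2 (changes s1 s2)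

-- ===== LEMMAS AND PROOFS =====

-- structural version of the two-pointer merge
def pvInter : List Char → List Char → Nat
  | [], _ => 0
  | _ :: _, [] => 0
  | x :: as, y :: bs =>
    if x = y then pvInter as bs + 1
    else if x < y then pvInter as (y :: bs)
    else pvInter (x :: as) bs
termination_by a b => a.length + b.length

-- the index loop computes pvInter on the remaining suffixes
theorem pvMatchLoop_eq (a b : List Char) (i j m : Nat) :
    pvMatchLoop a b i j m = m + pvInter (a.drop i) (b.drop j) := by
  induction i, j, m using pvMatchLoop.induct a b with
  | case1 i j m h heq ih =>
    rw [pvMatchLoop, dif_pos h, if_pos heq, ih,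
        List.drop_eq_getElem_cons h.1, List.drop_eq_getElem_cons h.2, heq, pvInter]
    simp
    omega
  | case2 i j m h hne hlt ih =>
    rw [pvMatchLoop, dif_pos h, if_neg hne, if_pos hlt, ih,
        List.drop_eq_getElem_cons h.1, List.drop_eq_getElem_cons h.2, pvInter,
        if_neg hne, if_pos hlt, ← List.drop_eq_getElem_cons h.2]
  | case3 i j m h hne hge ih =>
    rw [pvMatchLoop, dif_pos h, if_neg hne, if_neg hge, ih,
        List.drop_eq_getElem_cons h.1, List.drop_eq_getElem_cons h.2, pvInter,
        if_neg hne, if_neg hge, ← List.drop_eq_getElem_cons h.1]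
  | case4 i j m h =>
    rw [pvMatchLoop, dif_neg h]
    rcases Nat.lt_or_ge i a.length with hi | hi
    · have hj : b.length ≤ j := by omega
      rw [List.drop_eq_nil_of_le hj, List.drop_eq_getElem_cons hi, pvInter]
      omega
    · rw [List.drop_eq_nil_of_le hi]
      cases b.drop j <;> simp [pvInter]

-- on sorted lists, the merge counts the multiset intersection
theorem pvInter_card (a b : List Char) (ha : a.Pairwise (· ≤ ·)) (hb : b.Pairwise (· ≤ ·)) :
    pvInter a b = Multiset.card ((a : Multiset Char) ∩ (b : Multiset Char)) := by
  induction a, b using pvInter.induct with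
  | case1 b => simp [pvInter]
  | case2 x as => simp [pvInter]
  | case3 as x bs ih =>
    rw [pvInter, if_pos rfl, ih (List.Pairwise.of_cons ha) (List.Pairwise.of_cons hb)]
    have : ((x :: as : List Char) : Multiset Char) ∩ ((x :: bs : List Char) : Multiset Char)
        = x ::ₘ (((as : Multiset Char)) ∩ ((bs : Multiset Char))) := by
      ext c
      simp only [Multiset.count_inter, Multiset.count_cons, ← Multiset.cons_coe,
        Multiset.coe_count, List.count_cons]
      split <;> omega
    rw [this]; simp
  | case4 x as y bs hne hlt ih =>
    rw [pvInter, if_neg hne, if_pos hlt, ih (List.Pairwise.of_cons ha) hb]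
    have hx0 : (y :: bs).count x = 0 := by
      rw [List.count_eq_zero]
      intro hmem
      rcases List.mem_cons.mp hmem with h | h
      · exact hne h
      · exact absurd (List.rel_of_pairwise_cons hb h) (not_le.mpr hlt)
    have : ((x :: as : List Char) : Multiset Char) ∩ ((y :: bs : List Char) : Multiset Char)
        = ((as : Multiset Char)) ∩ ((y :: bs : List Char) : Multiset Char) := by
      ext c
      simp only [Multiset.count_inter, Multiset.coe_count]
      by_cases hc : c = x
      · subst hc; simp [hx0, List.count_cons]
      · rw [List.count_cons_of_ne (Ne.symm hc)]
    rw [this]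
  | case5 x as y bs hne hge ih =>
    rw [pvInter, if_neg hne, if_neg hge, ih ha (List.Pairwise.of_cons hb)]
    have hyx : y < x := lt_of_le_of_ne (not_lt.mp hge) (fun h => hne h.symm)
    have hy0 : (x :: as).count y = 0 := by
      rw [List.count_eq_zero]
      intro hmem
      rcases List.mem_cons.mp hmem with h | h
      · exact absurd (h ▸ hyx) (lt_irrefl y)
      · exact absurd (lt_of_lt_of_le hyx (List.rel_of_pairwise_cons ha h)) (lt_irrefl y)
    have : ((x :: as : List Char) : Multiset Char) ∩ ((y :: bs : List Char) : Multiset Char)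
        = ((x :: as : List Char) : Multiset Char) ∩ ((bs : Multiset Char)) := by
      ext c
      simp only [Multiset.count_inter, Multiset.coe_count]
      by_cases hc : c = y
      · subst hc; simp [hy0, List.count_cons]
      · rw [List.count_cons_of_ne (Ne.symm hc)]
    rw [this]

-- sum of casts is cast of sum
theorem map_cast_sum (l : List Char) (f : Char → Nat) :
    (l.map (fun c => (f c : Int))).sum = (((l.map f).sum : Nat) : Int) := by
  induction l with
  | nil => simp
  | cons x t ih => simp [ih]

-- a nodup list covering the support of M sums its counts to M's cardinality
theorem sum_count_eq_card (M : Multiset Char) (l : List Char) (hn : l.Nodup)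
    (hs : ∀ c ∈ M, c ∈ l) : (l.map (fun c => M.count c)).sum = Multiset.card M := by
  rw [← List.sum_toFinset _ hn, ← Multiset.toFinset_sum_count_eq M]
  refine (Finset.sum_subset ?_ ?_).symm
  · intro c hc
    exact List.mem_toFinset.mpr (hs c (Multiset.mem_toFinset.mp hc))
  · intro c _ hc
    exact Multiset.count_eq_zero.mpr (fun h => hc (Multiset.mem_toFinset.mpr h))

-- A's accumulating loop as a sum of the clipped surpluses
theorem foldl_if_pos_eq (ks : List Char) (g : Char → Int) (n : Int) :
    ks.foldl (fun n c => if g c > 0 then n + g c else n) n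
      = n + (ks.map (fun c => if g c > 0 then g c else 0)).sum := by
  induction ks generalizing n with
  | nil => simp
  | cons k t ih => simp [List.foldl_cons, ih]; split <;> ring

-- the distinct characters of ys, each weighted by its multiplicity, sum to the length of ys
theorem sum_count_ofList (ys : List Char) :
    ((PySem.Set.ofList ys).map (fun c => (ys.count c : Int))).sum = (ys.length : Int) := by
  have hperm : (PySem.Set.ofList ys).Perm ys.dedup := by
    refine (List.perm_ext_iff_of_nodup (PySem.Set.nodup_ofList ys) ys.nodup_dedup).2 ?_
    intro a; rw [PySem.Set.mem_ofList, List.mem_dedup]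
  rw [(hperm.map _).sum_eq]
  rw [← Int.natCast_inj.mpr (List.sum_map_count_dedup_eq_length ys)]
  push_cast
  rw [List.map_map]
  exact congrArg List.sum (List.map_congr_left (fun x _ => rfl))

theorem changes_eq (s1 s2 : String) : changes s1 s2 = changes_alt s1 s2 := by
  -- A's side: len(s2) − Σ_{c ∈ keys} min(count c s1, count c s2)
  simp only [changes, changes_alt, PySem.Dict.keys_counter, PySem.Dict.getD_counter,
    PySem.Str.len_eq, foldl_if_pos_eq, zero_add]
  have h := sum_count_ofList s2.toList
  set ks := PySem.Set.ofList s2.toList with hks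
  have hsplit : (ks.map (fun c => if (s2.toList.count c : Int) - (s1.toList.count c : Int) > 0
        then (s2.toList.count c : Int) - (s1.toList.count c : Int) else 0)).sum
      = (ks.map (fun c => (s2.toList.count c : Int))).sum
        - (ks.map (fun c => min ((s1.toList.count c : Int)) ((s2.toList.count c : Int)))).sum := by
    induction ks with
    | nil => simp
    | cons k t ih =>
      simp only [List.map_cons, List.sum_cons, ih]
      have : (if (s2.toList.count k : Int) - (s1.toList.count k : Int) > 0
          then (s2.toList.count k : Int) - (s1.toList.count k : Int) else 0)
          = (s2.toList.count k : Int) - min ((s1.toList.count k : Int)) ((s2.toList.count k : Int)) := by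
        rcases le_total ((s1.toList.count k : Int)) ((s2.toList.count k : Int)) with hle | hle <;>
          simp [hle] <;> omega
      rw [this]; ring
  rw [hsplit, h]
  -- B's side: pvMatchLoop = card of the multiset intersection
  set a := PySem.List.sorted s1.toList (fun x => x) false with hadef
  set b := PySem.List.sorted s2.toList (fun x => x) false with hbdef
  have hpa : a.Pairwise (· ≤ ·) := PySem.List.sorted_pairwise s1.toList (fun x => x)
  have hpb : b.Pairwise (· ≤ ·) := PySem.List.sorted_pairwise s2.toList (fun x => x)
  have hloop : pvMatchLoop a b 0 0 0
      = Multiset.card ((s1.toList : Multiset Char) ∩ (s2.toList : Multiset Char)) := by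
    rw [pvMatchLoop_eq, List.drop_zero, List.drop_zero, Nat.zero_add, pvInter_card a b hpa hpb]
    have h1 : (a : Multiset Char) = (s1.toList : Multiset Char) :=
      Multiset.coe_eq_coe.mpr (PySem.List.sorted_perm s1.toList (fun x => x) false)
    have h2 : (b : Multiset Char) = (s2.toList : Multiset Char) :=
      Multiset.coe_eq_coe.mpr (PySem.List.sorted_perm s2.toList (fun x => x) false)
    rw [h1, h2]
  rw [hloop]
  -- Σ_{c ∈ ks} min equals the intersection cardinality
  have hmin : (ks.map (fun c => min ((s1.toList.count c : Int)) ((s2.toList.count c : Int)))).sum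
      = (Multiset.card ((s1.toList : Multiset Char) ∩ (s2.toList : Multiset Char)) : Int) := by
    have hcnt : ∀ c : Char,
        min ((s1.toList.count c : Int)) ((s2.toList.count c : Int))
          = (((s1.toList : Multiset Char) ∩ (s2.toList : Multiset Char)).count c : Int) := by
      intro c
      rw [Multiset.count_inter]
      simp only [← Multiset.coe_count]
      push_cast
      rfl
    rw [List.map_congr_left (fun c _ => hcnt c), map_cast_sum,
        sum_count_eq_card ((s1.toList : Multiset Char) ∩ (s2.toList : Multiset Char)) ks
          (PySem.Set.nodup_ofList s2.toList) ?_]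
    intro c hc
    have : c ∈ (s2.toList : Multiset Char) :=
      Multiset.mem_of_le Multiset.inter_le_right hc
    exact (PySem.Set.mem_ofList _ _).mpr (by simpa using this)
  rw [hmin]

-- ===== VERDICT (by name: the statement is the Claim_ definition above) =====
theorem changes_spec : Claim_equal_changes := by
  intro s1 s2 _
  unfold Spec_changes
  exact changes_eq s1 s2
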